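-- pv_equiv track=rewrite | github.com/Winibo/Misc-Python | Challenges/WordFunnel.py | wordfunnel
-- ===== SOURCE A (Python) =====
-- import itertools
-- import functools
--
-- def wordfunnel(word, substring):
--     possibilities = list(itertools.combinations(word, len(word)-1))
--     possibilities = [functools.reduce(lambda a, b: a + b, x) for x in possibilities]
--     true = [x for x in possibilities if x == substring]
--     if true:
--         return True
--     else:
--         return False
-- ===== SOURCE B (Python) =====
-- def wordfunnel(word, substring):
--     # single-pass: substring must be word with exactly one char deleted
--     if len(substring) != len(word) - 1:
--         return False
--     i = 0
--     while i < len(substring) and word[i] == substring[i]: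
--         i += 1
--     return word[i+1:] == substring[i:]
-- ===== Notes on version B (the rewrite author's own statement) =====
-- stated objective: faster
-- what changed: Instead of materialising all len(word) combinations of length len(word)-1 (each rebuilt by reduce-concatenation) and filtering, B scans once to the first mismatch and compares the remaining suffixes.
-- crash fix: On words of length < 2 A raises (ValueError from combinations(word,-1) for the empty word, TypeError from reduce over an empty tuple for a 1-char word) while B returns the natural deletion-match answer. — e.g. on wordfunnel("a", ""): A raises TypeError, B returns true
import Mathlib
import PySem

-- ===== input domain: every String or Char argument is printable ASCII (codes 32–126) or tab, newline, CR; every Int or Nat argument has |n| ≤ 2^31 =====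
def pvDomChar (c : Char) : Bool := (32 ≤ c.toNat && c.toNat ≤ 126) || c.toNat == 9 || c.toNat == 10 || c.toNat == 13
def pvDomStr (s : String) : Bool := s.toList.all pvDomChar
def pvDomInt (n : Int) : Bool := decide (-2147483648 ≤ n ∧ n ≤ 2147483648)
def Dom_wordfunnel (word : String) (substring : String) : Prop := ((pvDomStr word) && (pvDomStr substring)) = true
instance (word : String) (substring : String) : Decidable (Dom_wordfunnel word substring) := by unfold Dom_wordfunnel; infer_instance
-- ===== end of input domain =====

-- B replaces A's "build all length-(n-1) combinations and filter" by a single scan to the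
-- first mismatch followed by a suffix comparison (objective: faster).
-- ===== PORT A =====
-- itertools.combinations(l, r) over the characters of the word (exact for r = len-1 uses;
-- general recursive definition matching itertools' selection order)
def pvComb (l : List Char) (r : Int) : List (List Char) :=
  if r < 0 then []
  else if r = 0 then [[]]
  else
    match l with
    | [] => []
    | x :: xs => (pvComb xs (r - 1)).map (fun t => x :: t) ++ pvComb xs r
  termination_by l.length
  decreasing_by all_goals simp

-- functools.reduce(lambda a, b: a + b, x) over a tuple of 1-char strings; Python raises on the
-- empty tuple (excluded by Pre_), here it yields "".
def pvReduceConcat (x : List Char) : String :=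
  match x with
  | [] => ""
  | c :: cs => cs.foldl String.push (String.ofList [c])

def wordfunnel (word : String) (substring : String) : Bool :=
  let possibilities := pvComb word.toList ((word.toList.length : Int) - 1)
  let possibilities := possibilities.map pvReduceConcat
  let t := possibilities.filter (fun x => x == substring)
  if t.isEmpty then false else true

-- ===== PORT B =====
-- the while loop advancing past the common prefix, then the slice comparison word[i+1:] == substring[i:]
def pvDelMatch : List Char → List Char → Bool
  | _ :: ws, [] => ws == []
  | a :: ws, b :: ss => if a = b then pvDelMatch ws ss else ws == b :: ss
  | [], _ => false

def wordfunnel_alt (word : String) (substring : String) : Bool :=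
  if (substring.toList.length : Int) ≠ (word.toList.length : Int) - 1 then false
  else pvDelMatch word.toList substring.toList

-- ===== PRECONDITION & SPEC =====
-- Pre_ excludes words of length < 2, on which Python's A raises (ValueError / TypeError).
def Pre_wordfunnel (word : String) (substring : String) : Prop := 2 ≤ word.toList.length
instance (word : String) (substring : String) : Decidable (Pre_wordfunnel word substring) := by unfold Pre_wordfunnel; infer_instance
def pvWitness_wordfunnel : String × String := ("bag", "bg")

-- On words of length < 2, A raises (ValueError for the empty word, TypeError for a 1-char word);
-- B returns the deletion-match answer.
-- (theorem wordfunnel_raises below: this region lies outside Pre_, and B's port returns pvRaiseWitnessOut_wordfunnel at the witness)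
def Raises_wordfunnel (word : String) (substring : String) : Prop := word.toList.length < 2
instance (word : String) (substring : String) : Decidable (Raises_wordfunnel word substring) := by unfold Raises_wordfunnel; infer_instance
def pvRaiseWitness_wordfunnel : String × String := ("a", "")
def pvRaiseWitnessOut_wordfunnel : Bool := true

def Spec_wordfunnel (word : String) (substring : String) (out : Bool) : Prop := out = wordfunnel_alt word substring
instance (word : String) (substring : String) (out : Bool) : Decidable (Spec_wordfunnel word substring out) := by unfold Spec_wordfunnel; infer_instance

-- ===== CLAIM (what is proved, stated in full; the proofs are below) =====
def Claim_equal_wordfunnel : Prop := ∀ (word : String) (substring : String), Dom_wordfunnel word substring → Pre_wordfunnel word substring → Spec_wordfunnel word substring (wordfunnel word substring)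
def Claim_raises_wordfunnel : Prop := (∀ (word : String) (substring : String), Dom_wordfunnel word substring → Raises_wordfunnel word substring → ¬ Pre_wordfunnel word substring) ∧ (Dom_wordfunnel (pvRaiseWitness_wordfunnel.1) (pvRaiseWitness_wordfunnel.2) ∧ Raises_wordfunnel (pvRaiseWitness_wordfunnel.1) (pvRaiseWitness_wordfunnel.2) ∧ wordfunnel_alt (pvRaiseWitness_wordfunnel.1) (pvRaiseWitness_wordfunnel.2) = pvRaiseWitnessOut_wordfunnel)

-- ===== LEMMAS AND PROOFS =====

lemma pvComb_big (l : List Char) (r : Int) (h : (l.length : Int) < r) : pvComb l r = [] := by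
  induction l generalizing r with
  | nil =>
    rw [pvComb]
    simp at h
    have h0 : ¬ r < 0 := by omega
    have h1 : ¬ r = 0 := by omega
    simp [h0, h1]
  | cons x xs ih =>
    rw [pvComb]
    simp at h
    have h0 : ¬ r < 0 := by omega
    have h1 : ¬ r = 0 := by omega
    simp [h0, h1]
    constructor
    · exact ih (r - 1) (by omega)
    · exact ih r (by omega)

lemma pvComb_full (l : List Char) : pvComb l (l.length : Int) = [l] := by
  induction l with
  | nil => rw [pvComb]; simp
  | cons x xs ih =>
    rw [pvComb]
    have h0 : ¬ ((x :: xs).length : Int) < 0 := by simp only [List.length_cons]; push_cast; omega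
    have h1 : ¬ ((x :: xs).length : Int) = 0 := by simp only [List.length_cons]; push_cast; omega
    simp only [h0, h1, if_false]
    have e : ((x :: xs).length : Int) - 1 = (xs.length : Int) := by simp only [List.length_cons]; push_cast; omega
    rw [e, ih, pvComb_big xs ((x :: xs).length : Int) (by simp only [List.length_cons]; push_cast; omega)]
    simp

lemma mem_pvComb (w s : List Char) :
    s ∈ pvComb w ((w.length : Int) - 1) ↔ ∃ i < w.length, w.eraseIdx i = s := by
  induction w generalizing s with
  | nil => rw [pvComb]; simp
  | cons x xs ih =>
    match xs with
    | [] =>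
      have hc : pvComb [x] (([x].length : Int) - 1) = [[]] := by
        rw [pvComb]; norm_num
      rw [hc]
      simp only [List.mem_singleton]
      constructor
      · rintro rfl; exact ⟨0, by simp, rfl⟩
      · rintro ⟨i, hi, he⟩
        have h0 : i = 0 := Nat.lt_one_iff.mp (by simpa using hi)
        subst h0
        exact he.symm
    | y :: ys =>
      rw [pvComb]
      have h0 : ¬ (((x :: y :: ys).length : Int) - 1) < 0 := by simp only [List.length_cons]; push_cast; omega
      have h1 : ¬ (((x :: y :: ys).length : Int) - 1) = 0 := by simp only [List.length_cons]; push_cast; omega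
      simp only [h0, h1, if_false]
      have e1 : ((x :: y :: ys).length : Int) - 1 - 1 = ((y :: ys).length : Int) - 1 := by
        simp only [List.length_cons]; push_cast; omega
      have e2 : ((x :: y :: ys).length : Int) - 1 = ((y :: ys).length : Int) := by
        simp only [List.length_cons]; push_cast; omega
      rw [e1, e2, pvComb_full]
      simp only [List.mem_append, List.mem_map, List.mem_singleton]
      constructor
      · rintro (⟨t, ht, rfl⟩ | rfl)
        · obtain ⟨i, hi, he⟩ := (ih t).1 ht
          exact ⟨i + 1, by simpa using hi, by rw [List.eraseIdx_cons_succ, he]⟩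
        · exact ⟨0, by simp, by simp⟩
      · rintro ⟨i, hi, rfl⟩
        match i with
        | 0 => right; simp
        | i + 1 =>
          left
          refine ⟨(y :: ys).eraseIdx i, (ih _).2 ⟨i, by simpa using hi, rfl⟩, ?_⟩
          rw [List.eraseIdx_cons_succ]

lemma pvDelMatch_iff (w s : List Char) (hlen : s.length + 1 = w.length) :
    pvDelMatch w s = true ↔ ∃ i < w.length, w.eraseIdx i = s := by
  induction w generalizing s with
  | nil => simp at hlen
  | cons a ws ih =>
    match s with
    | [] =>
      have hws : ws = [] := by
        have h1 : ws.length = 0 := by simpa using hlen.symm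
        exact List.length_eq_zero_iff.mp h1
      subst hws
      constructor
      · intro _; exact ⟨0, by simp, rfl⟩
      · intro _; rfl
    | b :: ss =>
      have hlen' : ss.length + 1 = ws.length := by simpa using hlen
      rw [pvDelMatch]
      by_cases hab : a = b
      · simp only [hab, if_true]
        rw [ih ss hlen']
        constructor
        · rintro ⟨i, hi, rfl⟩
          exact ⟨i + 1, by simpa using hi, by rw [List.eraseIdx_cons_succ]⟩
        · rintro ⟨i, hi, he⟩
          match i with
          | 0 =>
            simp only [List.eraseIdx_cons_zero] at he
            refine ⟨0, by simp [he], ?_⟩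
            rw [he, List.eraseIdx_cons_zero]
          | i + 1 =>
            rw [List.eraseIdx_cons_succ] at he
            injection he with h1 h2
            exact ⟨i, by simpa using hi, h2⟩
      · simp only [hab, if_false, beq_iff_eq]
        constructor
        · rintro rfl; exact ⟨0, by simp, by rw [List.eraseIdx_cons_zero]⟩
        · rintro ⟨i, hi, he⟩
          match i with
          | 0 => simpa [List.eraseIdx_cons_zero] using he
          | i + 1 =>
            rw [List.eraseIdx_cons_succ] at he
            injection he with h1 h2
            exact absurd h1 hab

lemma pvReduceConcat_toList (x : List Char) : (pvReduceConcat x).toList = x := by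
  match x with
  | [] => rfl
  | c :: cs =>
    show (cs.foldl String.push (String.ofList [c])).toList = c :: cs
    suffices h : ∀ (cs : List Char) (s : String),
        (cs.foldl String.push s).toList = s.toList ++ cs by
      simpa using h cs (String.ofList [c])
    intro cs
    induction cs with
    | nil => simp
    | cons d ds ih =>
      intro s
      simp only [List.foldl_cons, ih]
      simp

lemma wordfunnel_iff (word substring : String) :
    wordfunnel word substring = true ↔
      ∃ i < word.toList.length, word.toList.eraseIdx i = substring.toList := by
  rw [← mem_pvComb]
  simp only [wordfunnel]
  rw [show ∀ (c : Bool), ((if c = true then false else true) = true) ↔ c = false from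
    by intro c; cases c <;> simp]
  rw [List.isEmpty_eq_false_iff, ne_eq, List.filter_eq_nil_iff]
  push Not
  constructor
  · rintro ⟨x, hx, hbe⟩
    obtain ⟨t, ht, rfl⟩ := List.mem_map.mp hx
    rw [beq_iff_eq] at hbe
    have : t = substring.toList := by
      rw [← hbe, pvReduceConcat_toList]
    rwa [this] at ht
  · intro h
    refine ⟨pvReduceConcat substring.toList, List.mem_map.mpr ⟨substring.toList, h, rfl⟩, ?_⟩
    rw [beq_iff_eq]
    exact String.toList_inj.mp (pvReduceConcat_toList _)

theorem wordfunnel_eq_alt (word substring : String) :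
    wordfunnel word substring = wordfunnel_alt word substring := by
  unfold wordfunnel_alt
  by_cases hlen : (substring.toList.length : Int) = (word.toList.length : Int) - 1
  · rw [if_neg (fun hc => hc hlen)]
    have hl : substring.toList.length + 1 = word.toList.length := by omega
    have hiff := (wordfunnel_iff word substring).trans (pvDelMatch_iff _ _ hl).symm
    cases h : pvDelMatch word.toList substring.toList with
    | true => exact hiff.mpr h
    | false =>
      cases hw : wordfunnel word substring with
      | false => rfl
      | true => exact absurd (h ▸ hiff.mp hw) (by simp)
  · rw [if_pos hlen]
    cases hw : wordfunnel word substring with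
    | false => rfl
    | true =>
      obtain ⟨i, hi, he⟩ := (wordfunnel_iff _ _).mp hw
      have := congrArg List.length he
      simp only [List.length_eraseIdx, hi, if_true] at this
      omega

-- ===== VERDICT (by name: the statement is the Claim_ definition above) =====
theorem wordfunnel_spec : Claim_equal_wordfunnel := by
  intro word substring _ _
  exact wordfunnel_eq_alt word substring

theorem wordfunnel_raises : Claim_raises_wordfunnel := by
  unfold Claim_raises_wordfunnel
  refine ⟨?_, by decide⟩
  intro word substring _ hr hp
  unfold Pre_wordfunnel at hp
  unfold Raises_wordfunnel at hr
  omega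

-- self-check: the raise witness really lies inside Raises_ (a corollary of wordfunnel_raises)
theorem pvRaiseWitness_wordfunnel_ok :
    Raises_wordfunnel pvRaiseWitness_wordfunnel.1 pvRaiseWitness_wordfunnel.2 := by
  have h := wordfunnel_raises
  unfold Claim_raises_wordfunnel at h
  exact h.2.2.1
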